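-- pv_equiv track=rewrite | github.com/RachitSingh-Creator/investiq | backend/tools/market_data.py | infer_currency_from_symbol
-- ===== SOURCE A (Python) =====
-- def infer_currency_from_symbol(ticker_str: str, fallback: str = "USD") -> str:
--     symbol = (ticker_str or "").upper()
--     suffix_currency_map = {
--         ".NS": "INR",
--         ".BO": "INR",
--         ".L": "GBP",
--         ".T": "JPY",
--         ".DE": "EUR",
--         ".PA": "EUR",
--         ".AS": "EUR",
--         ".MI": "EUR",
--     }
--
--     for suffix, currency in suffix_currency_map.items():
--         if symbol.endswith(suffix):
--             return currency
--
--     return fallback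
-- ===== SOURCE B (Python) =====
-- _SUFFIX_CURRENCY = {
--     "NS": "INR", "BO": "INR", "L": "GBP", "T": "JPY",
--     "DE": "EUR", "PA": "EUR", "AS": "EUR", "MI": "EUR",
-- }
--
-- def infer_currency_from_symbol(ticker_str: str, fallback: str = "USD") -> str:
--     symbol = (ticker_str or "").upper()
--     _head, dot, tail = symbol.rpartition(".")
--     if not dot:
--         return fallback
--     return _SUFFIX_CURRENCY.get(tail, fallback)
-- ===== Notes on version B (the rewrite author's own statement) =====
-- stated objective: simpler
-- what changed: A loops over the suffix map testing endswith for each key; B extracts the trailing segment once with rpartition and does a single dict lookup with the fallback as default.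
import Mathlib
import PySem

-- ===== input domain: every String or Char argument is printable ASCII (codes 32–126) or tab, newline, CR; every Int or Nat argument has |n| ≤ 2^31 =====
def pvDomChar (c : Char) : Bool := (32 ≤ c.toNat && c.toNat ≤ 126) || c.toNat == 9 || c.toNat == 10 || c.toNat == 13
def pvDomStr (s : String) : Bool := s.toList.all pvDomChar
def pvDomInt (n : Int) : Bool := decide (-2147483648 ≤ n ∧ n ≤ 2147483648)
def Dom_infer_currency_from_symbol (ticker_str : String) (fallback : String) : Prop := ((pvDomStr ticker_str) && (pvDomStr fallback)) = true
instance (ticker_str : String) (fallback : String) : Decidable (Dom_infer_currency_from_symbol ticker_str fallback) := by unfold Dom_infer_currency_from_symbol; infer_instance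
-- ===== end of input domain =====

-- B replaces A's loop of endswith tests by one rpartition('.') and a single dict lookup (objective: simpler; no speed claim).

-- ===== PORT A =====
-- the dict literal suffix_currency_map, in insertion order (keys as char lists)
def pvSuffixCurrencyMap : List (List Char × String) :=
  [(['.','N','S'], "INR"), (['.','B','O'], "INR"), (['.','L'], "GBP"), (['.','T'], "JPY"),
   (['.','D','E'], "EUR"), (['.','P','A'], "EUR"), (['.','A','S'], "EUR"), (['.','M','I'], "EUR")]

-- the 'for suffix, currency in …: if symbol.endswith(suffix): return currency' loop
def pvInferLoopA (m : List (List Char × String)) (sym : List Char) (fb : String) : String :=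
  match m with
  | [] => fb
  | (suf, cur) :: rest =>
    if PySem.Chars.endswith sym suf then cur else pvInferLoopA rest sym fb

def infer_currency_from_symbol (ticker_str : String) (fallback : String) : String :=
  -- '(ticker_str or "").upper()': for a str argument, 'ticker_str or ""' is ticker_str itself
  let sym := PySem.Chars.upper ticker_str.toList
  pvInferLoopA pvSuffixCurrencyMap sym fallback

-- ===== PORT B =====
-- the dict literal _SUFFIX_CURRENCY (keys without the dot)
def pvTailCurrencyMap : List (List Char × String) :=
  [(['N','S'], "INR"), (['B','O'], "INR"), (['L'], "GBP"), (['T'], "JPY"),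
   (['D','E'], "EUR"), (['P','A'], "EUR"), (['A','S'], "EUR"), (['M','I'], "EUR")]

def infer_currency_from_symbol_alt (ticker_str : String) (fallback : String) : String :=
  let sym := PySem.Chars.upper ticker_str.toList
  -- symbol.rpartition(".") ported by hand (no PySem primitive), exact: split at the LAST '.'
  let rev := sym.reverse
  match rev.dropWhile (· ≠ '.') with
  | [] => fallback                        -- no dot: rpartition yields dot = "" → fallback
  | _ :: _ =>
    let tail := (rev.takeWhile (· ≠ '.')).reverse
    (pvTailCurrencyMap.lookup tail).getD fallback   -- _SUFFIX_CURRENCY.get(tail, fallback)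

-- ===== PRECONDITION & SPEC =====
def Spec_infer_currency_from_symbol (ticker_str : String) (fallback : String) (out : String) : Prop := out = infer_currency_from_symbol_alt ticker_str fallback
instance (ticker_str : String) (fallback : String) (out : String) : Decidable (Spec_infer_currency_from_symbol ticker_str fallback out) := by unfold Spec_infer_currency_from_symbol; infer_instance

-- ===== CLAIM (what is proved, stated in full; the proofs are below) =====
def Claim_equal_infer_currency_from_symbol : Prop := ∀ (ticker_str : String) (fallback : String), Dom_infer_currency_from_symbol ticker_str fallback → Spec_infer_currency_from_symbol ticker_str fallback (infer_currency_from_symbol ticker_str fallback)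

-- ===== LEMMAS AND PROOFS =====

-- a '.'-terminated block is a prefix of "dot-free ++ '.' :: rest" exactly when it equals the dot-free part
lemma pv_prefix_dot_iff (u t d' : List Char) (hu : '.' ∉ u) (ht : '.' ∉ t) :
    (u ++ ['.'] <+: t ++ '.' :: d') ↔ u = t := by
  induction u generalizing t with
  | nil =>
    cases t with
    | nil => simp
    | cons c t' =>
      simp only [List.nil_append, List.cons_append, List.cons_prefix_cons]
      constructor
      · rintro ⟨h, -⟩
        exact absurd (show '.' ∈ c :: t' by rw [← h]; exact List.mem_cons_self ..) ht
      · intro h; exact absurd h (by simp)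
  | cons a u' ih =>
    cases t with
    | nil =>
      simp only [List.cons_append, List.nil_append, List.cons_prefix_cons]
      constructor
      · rintro ⟨h, -⟩
        exact absurd (show '.' ∈ a :: u' by rw [h]; exact List.mem_cons_self ..) hu
      · intro h; exact absurd h (by simp)
    | cons c t' =>
      simp only [List.cons_append, List.cons_prefix_cons]
      have hu' : '.' ∉ u' := fun h => hu (List.mem_cons_of_mem _ h)
      have ht' : '.' ∉ t' := fun h => ht (List.mem_cons_of_mem _ h)
      rw [ih t' hu' ht']
      constructor
      · rintro ⟨rfl, rfl⟩; rfl
      · intro h; injection h with h1 h2; exact ⟨h1, h2⟩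

-- endswith on a '.'-prefixed key, through the last-dot decomposition of sym.reverse
lemma pv_endswith_key (sym t d' : List Char) (hrev : sym.reverse = t ++ '.' :: d') (ht : '.' ∉ t)
    (k : List Char) (hk : '.' ∉ k) :
    PySem.Chars.endswith sym ('.' :: k) = decide (k.reverse = t) := by
  rw [Bool.eq_iff_iff, PySem.Chars.endswith_iff, decide_eq_true_iff, ← List.reverse_prefix]
  simp only [List.reverse_cons, hrev]
  exact pv_prefix_dot_iff k.reverse t d' (by simpa using hk) ht

-- endswith is false for every '.'-containing suffix when sym has no '.'
lemma pv_endswith_nodot (sym suf : List Char) (hsym : '.' ∉ sym) (hsuf : '.' ∈ suf) :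
    PySem.Chars.endswith sym suf = false := by
  rw [← Bool.not_eq_true, PySem.Chars.endswith_iff]
  intro hs
  exact hsym (hs.subset hsuf)

-- the head of a non-empty dropWhile (· ≠ '.') result is '.'
lemma pv_dropWhile_head (l : List Char) (c : Char) (d' : List Char)
    (h : l.dropWhile (· ≠ '.') = c :: d') : c = '.' := by
  induction l with
  | nil => simp at h
  | cons a l' ih =>
    by_cases ha : a = '.'
    · rw [List.dropWhile_cons_of_neg (by simpa using ha)] at h
      injection h with h1 _
      rw [← h1, ha]
    · rw [List.dropWhile_cons_of_pos (by simpa using ha)] at h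
      exact ih h

theorem infer_currency_from_symbol_spec : Claim_equal_infer_currency_from_symbol := by
  intro ticker fallback _
  unfold Spec_infer_currency_from_symbol infer_currency_from_symbol infer_currency_from_symbol_alt
  set sym := PySem.Chars.upper ticker.toList with hsym
  have ht : '.' ∉ sym.reverse.takeWhile (· ≠ '.') := by
    intro h
    have := List.mem_takeWhile_imp h
    simp at this
  have hsplit := List.takeWhile_append_dropWhile (p := (· ≠ '.')) (l := sym.reverse)
  cases hd : sym.reverse.dropWhile (· ≠ '.') with
  | nil =>
    have hnod : '.' ∉ sym := by
      intro h
      have := List.dropWhile_eq_nil_iff.mp hd '.' (List.mem_reverse.mpr h)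
      simp at this
    simp only [hd]
    simp [pvInferLoopA, pvSuffixCurrencyMap,
      pv_endswith_nodot sym ['.','N','S'] hnod (by decide),
      pv_endswith_nodot sym ['.','B','O'] hnod (by decide),
      pv_endswith_nodot sym ['.','L'] hnod (by decide),
      pv_endswith_nodot sym ['.','T'] hnod (by decide),
      pv_endswith_nodot sym ['.','D','E'] hnod (by decide),
      pv_endswith_nodot sym ['.','P','A'] hnod (by decide),
      pv_endswith_nodot sym ['.','A','S'] hnod (by decide),
      pv_endswith_nodot sym ['.','M','I'] hnod (by decide)]
  | cons c d' =>
    have hc : c = '.' := pv_dropWhile_head sym.reverse c d' hd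
    subst hc
    have hrev : sym.reverse = sym.reverse.takeWhile (· ≠ '.') ++ '.' :: d' := by
      conv_lhs => rw [← hsplit]
      rw [hd]
    simp only [hd]
    set t := sym.reverse.takeWhile (· ≠ '.') with htdef
    simp only [pvInferLoopA, pvSuffixCurrencyMap,
      pv_endswith_key sym t d' hrev ht ['N','S'] (by decide),
      pv_endswith_key sym t d' hrev ht ['B','O'] (by decide),
      pv_endswith_key sym t d' hrev ht ['L'] (by decide),
      pv_endswith_key sym t d' hrev ht ['T'] (by decide),
      pv_endswith_key sym t d' hrev ht ['D','E'] (by decide),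
      pv_endswith_key sym t d' hrev ht ['P','A'] (by decide),
      pv_endswith_key sym t d' hrev ht ['A','S'] (by decide),
      pv_endswith_key sym t d' hrev ht ['M','I'] (by decide)]
    by_cases h1 : t = ['S','N']; · simp [h1, pvTailCurrencyMap, List.lookup]
    by_cases h2 : t = ['O','B']; · simp [h2, pvTailCurrencyMap, List.lookup]
    by_cases h3 : t = ['L'];     · simp [h3, pvTailCurrencyMap, List.lookup]
    by_cases h4 : t = ['T'];     · simp [h4, pvTailCurrencyMap, List.lookup]
    by_cases h5 : t = ['E','D']; · simp [h5, pvTailCurrencyMap, List.lookup]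
    by_cases h6 : t = ['A','P']; · simp [h6, pvTailCurrencyMap, List.lookup]
    by_cases h7 : t = ['S','A']; · simp [h7, pvTailCurrencyMap, List.lookup]
    by_cases h8 : t = ['I','M']; · simp [h8, pvTailCurrencyMap, List.lookup]
    have e : ∀ (k kr : List Char), k.reverse = kr → ¬ t = kr → (t.reverse == k) = false := by
      intro k kr hk hn
      rw [beq_eq_false_iff_ne]
      intro h
      apply hn
      rw [← hk, ← h, List.reverse_reverse]
    simp only [List.lookup, pvTailCurrencyMap,
      e ['N','S'] ['S','N'] (by decide) h1, e ['B','O'] ['O','B'] (by decide) h2,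
      e ['L'] ['L'] (by decide) h3, e ['T'] ['T'] (by decide) h4,
      e ['D','E'] ['E','D'] (by decide) h5, e ['P','A'] ['A','P'] (by decide) h6,
      e ['A','S'] ['S','A'] (by decide) h7, e ['M','I'] ['I','M'] (by decide) h8]
    simp [
      (show ¬(['S','N'] = t) from fun h => h1 h.symm), (show ¬(['O','B'] = t) from fun h => h2 h.symm),
      (show ¬(['L'] = t) from fun h => h3 h.symm), (show ¬(['T'] = t) from fun h => h4 h.symm),
      (show ¬(['E','D'] = t) from fun h => h5 h.symm), (show ¬(['A','P'] = t) from fun h => h6 h.symm),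
      (show ¬(['S','A'] = t) from fun h => h7 h.symm), (show ¬(['I','M'] = t) from fun h => h8 h.symm)]
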